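-- pv_equiv track=rewrite | github.com/chyjuls/EDX_Python-Fundamentals | Unit3_PracticeTest.py | valid_product_code
-- ===== SOURCE A (Python) =====
-- def valid_product_code(valid_string):
--     if len(valid_string) % 4 == 0:
--         if "A1" in valid_string:
--             for char in valid_string:
--                 if char not in "ABCDEFGHIJKLMNOPQRSTUVWXYZ0123456789":
--                     return False
--             return True
--
--         return False
--     return False
-- ===== SOURCE B (Python) =====
-- def valid_product_code(valid_string):
--     # single left-to-right pass with an accumulator state machine:
--     # counts the length, detects the adjacent pair "A1" via the previous
--     # character, and checks the character class by code-point ranges,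
--     # instead of A's staged length / substring / membership-scan checks
--     n = 0
--     prev = ''
--     has_a1 = False
--     all_ok = True
--     for ch in valid_string:
--         n += 1
--         if prev == 'A' and ch == '1':
--             has_a1 = True
--         if not ('A' <= ch <= 'Z' or '0' <= ch <= '9'):
--             all_ok = False
--         prev = ch
--     return n % 4 == 0 and has_a1 and all_ok
-- ===== Notes on version B (the rewrite author's own statement) =====
-- stated objective: alternative
-- what changed: Replaces A's staged checks (length test, substring scan via 'in', then a per-character membership scan over a 36-char literal) by one single-pass state machine that simultaneously counts length, detects the adjacent pair 'A1' via a previous-character register, and validates characters by code-point range comparisons.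
import Mathlib
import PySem

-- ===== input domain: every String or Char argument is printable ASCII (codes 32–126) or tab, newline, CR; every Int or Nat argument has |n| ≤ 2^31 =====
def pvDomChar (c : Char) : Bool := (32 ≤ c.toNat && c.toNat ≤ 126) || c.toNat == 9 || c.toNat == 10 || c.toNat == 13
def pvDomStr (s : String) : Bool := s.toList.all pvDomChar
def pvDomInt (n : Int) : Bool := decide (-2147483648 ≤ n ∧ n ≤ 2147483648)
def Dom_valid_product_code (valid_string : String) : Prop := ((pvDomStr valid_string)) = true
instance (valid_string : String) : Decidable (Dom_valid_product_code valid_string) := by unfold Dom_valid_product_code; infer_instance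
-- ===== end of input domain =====

-- B replaces A's staged checks (length test, substring test, per-character membership scan)
-- by one single-pass state machine over the characters (alternative decomposition; same cost).

def pvAllowed : String := "ABCDEFGHIJKLMNOPQRSTUVWXYZ0123456789"

-- ===== PORT A =====
-- 'for char in valid_string: if char not in ALLOWED: return False' / 'return True';
-- for a single char, Python's substring test 'char in <literal>' is exactly list membership.
def pvLoopA : List Char → Bool
  | [] => true
  | c :: rest => if !(pvAllowed.toList.contains c) then false else pvLoopA rest

def valid_product_code (valid_string : String) : Bool :=
  if PySem.Int.mod (PySem.Str.len valid_string) 4 == 0 then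
    if PySem.Str.isIn "A1" valid_string then
      pvLoopA valid_string.toList
    else false
  else false

-- ===== PORT B =====
-- "'A' <= ch <= 'Z' or '0' <= ch <= '9'": Python's char comparison is code-point order = Char ≤
def pvAllowedCharB (c : Char) : Bool := ('A' ≤ c && c ≤ 'Z') || ('0' ≤ c && c ≤ '9')

-- the for-loop of Source B: state (prev, n, has_a1, all_ok); prev = '' at start is ported as none
def pvLoopB : Option Char → Int → Bool → Bool → List Char → Bool
  | _, n, hasA1, allOk, [] => (PySem.Int.mod n 4 == 0) && hasA1 && allOk
  | prev, n, hasA1, allOk, c :: rest =>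
      pvLoopB (some c) (n + 1)
        (if prev == some 'A' && c == '1' then true else hasA1)
        (if !pvAllowedCharB c then false else allOk)
        rest

def valid_product_code_alt (valid_string : String) : Bool :=
  pvLoopB none 0 false true valid_string.toList

-- ===== PRECONDITION & SPEC =====
def Spec_valid_product_code (valid_string : String) (out : Bool) : Prop := out = valid_product_code_alt valid_string
instance (valid_string : String) (out : Bool) : Decidable (Spec_valid_product_code valid_string out) := by unfold Spec_valid_product_code; infer_instance

-- ===== CLAIM =====
def Claim_equal_valid_product_code : Prop := ∀ (valid_string : String), Dom_valid_product_code valid_string → Spec_valid_product_code valid_string (valid_product_code valid_string)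

-- ===== LEMMAS AND PROOFS =====

-- B's has_a1 accumulator, isolated: does the list contain '1' right after prev/'A'?
def pvHasPair : Option Char → List Char → Bool
  | _, [] => false
  | prev, c :: rest => (prev == some 'A' && c == '1') || pvHasPair (some c) rest

theorem pvLoopB_eq (l : List Char) : ∀ (prev : Option Char) (n : Int) (h a : Bool),
    pvLoopB prev n h a l =
      ((PySem.Int.mod (n + l.length) 4 == 0) && (h || pvHasPair prev l)
        && (a && l.all pvAllowedCharB)) := by
  induction l with
  | nil => intro prev n h a; simp [pvLoopB, pvHasPair]
  | cons c rest ih =>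
      intro prev n h a
      rw [pvLoopB, ih]
      have hn : n + 1 + (rest.length : Int) = n + ((c :: rest).length : Int) := by
        push_cast [List.length_cons]; omega
      rw [hn]
      cases hp : (prev == some 'A' && c == '1') <;>
        cases hq : pvAllowedCharB c <;>
          simp [pvHasPair, hp, hq, Bool.and_assoc]

theorem singleton_prefix_iff (c : Char) (l : List Char) :
    [c] <+: l ↔ l.head? = some c := by
  cases l with
  | nil => simp
  | cons x xs => simp [List.cons_prefix_cons, eq_comm]

theorem pvHasPair_iff (l : List Char) : ∀ (prev : Option Char),
    pvHasPair prev l = true ↔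
      (prev = some 'A' ∧ l.head? = some '1') ∨ ['A', '1'] <:+: l := by
  induction l with
  | nil => intro prev; simp [pvHasPair]
  | cons c rest ih =>
      intro prev
      rw [pvHasPair, List.infix_cons_iff]
      have hpre : ['A', '1'] <+: c :: rest ↔ c = 'A' ∧ rest.head? = some '1' := by
        rw [List.cons_prefix_cons, singleton_prefix_iff]
        tauto
      simp only [Bool.or_eq_true, Bool.and_eq_true, beq_iff_eq, ih, hpre,
        List.head?_cons, Option.some.injEq]

theorem pvHasPair_eq_isIn (s : String) :
    pvHasPair none s.toList = PySem.Str.isIn "A1" s := by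
  rw [Bool.eq_iff_iff, PySem.Str.isIn_iff_infix, pvHasPair_iff]
  simp

theorem pv_allowed_eq (c : Char) :
    pvAllowed.toList.contains c = pvAllowedCharB c := by
  rw [Bool.eq_iff_iff]
  have hl : pvAllowed.toList =
      ['A','B','C','D','E','F','G','H','I','J','K','L','M','N','O','P','Q','R','S',
       'T','U','V','W','X','Y','Z','0','1','2','3','4','5','6','7','8','9'] := by rfl
  rw [hl]
  simp only [pvAllowedCharB, List.contains_eq_mem, List.mem_cons, List.not_mem_nil,
    or_false, decide_eq_true_eq, Bool.or_eq_true, Bool.and_eq_true,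
    Char.le_def, Char.ext_iff, UInt32.le_iff_toNat_le, UInt32.ext_iff,
    (show ('A'.val.toNat = 65) from rfl),
    (show ('B'.val.toNat = 66) from rfl),
    (show ('C'.val.toNat = 67) from rfl),
    (show ('D'.val.toNat = 68) from rfl),
    (show ('E'.val.toNat = 69) from rfl),
    (show ('F'.val.toNat = 70) from rfl),
    (show ('G'.val.toNat = 71) from rfl),
    (show ('H'.val.toNat = 72) from rfl),
    (show ('I'.val.toNat = 73) from rfl),
    (show ('J'.val.toNat = 74) from rfl),
    (show ('K'.val.toNat = 75) from rfl),
    (show ('L'.val.toNat = 76) from rfl),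
    (show ('M'.val.toNat = 77) from rfl),
    (show ('N'.val.toNat = 78) from rfl),
    (show ('O'.val.toNat = 79) from rfl),
    (show ('P'.val.toNat = 80) from rfl),
    (show ('Q'.val.toNat = 81) from rfl),
    (show ('R'.val.toNat = 82) from rfl),
    (show ('S'.val.toNat = 83) from rfl),
    (show ('T'.val.toNat = 84) from rfl),
    (show ('U'.val.toNat = 85) from rfl),
    (show ('V'.val.toNat = 86) from rfl),
    (show ('W'.val.toNat = 87) from rfl),
    (show ('X'.val.toNat = 88) from rfl),
    (show ('Y'.val.toNat = 89) from rfl),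
    (show ('Z'.val.toNat = 90) from rfl),
    (show ('0'.val.toNat = 48) from rfl),
    (show ('1'.val.toNat = 49) from rfl),
    (show ('2'.val.toNat = 50) from rfl),
    (show ('3'.val.toNat = 51) from rfl),
    (show ('4'.val.toNat = 52) from rfl),
    (show ('5'.val.toNat = 53) from rfl),
    (show ('6'.val.toNat = 54) from rfl),
    (show ('7'.val.toNat = 55) from rfl),
    (show ('8'.val.toNat = 56) from rfl),
    (show ('9'.val.toNat = 57) from rfl)]
  omega

theorem pvLoopA_eq_all (l : List Char) :
    pvLoopA l = l.all pvAllowedCharB := by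
  induction l with
  | nil => rfl
  | cons c rest ih =>
      rw [pvLoopA, pv_allowed_eq c, ih]
      cases h : pvAllowedCharB c <;> simp [h]

-- ===== VERDICT =====
theorem valid_product_code_spec : Claim_equal_valid_product_code := by
  intro s _
  unfold Spec_valid_product_code valid_product_code valid_product_code_alt
  rw [pvLoopB_eq, pvHasPair_eq_isIn, pvLoopA_eq_all]
  have hlen : (0 : Int) + (s.toList.length : Int) = PySem.Str.len s := by
    simp [PySem.Str.len]
  rw [hlen]
  cases (PySem.Int.mod (PySem.Str.len s) 4 == 0) <;>
    cases (PySem.Str.isIn "A1" s) <;> simp
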